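-- pv_equiv track=rewrite | github.com/Deep-Innerspace/MyYahooEmails | src/web/routes/invoices.py | _next_candidate_id
-- ===== SOURCE A (Python) =====
-- def _next_candidate_id(tab_filtered: list, current_id: int):
--     """Return the email_id that follows current_id in the tab-filtered list.
--
--     If current_id was just removed from the tab (e.g. pending → invoice), it
--     won't appear in tab_filtered; return the first remaining candidate instead.
--     Returns None when the list is empty (all done).
--     """
--     if not tab_filtered:
--         return None
--     ids = [c["email_id"] for c in tab_filtered]
--     try:
--         idx = ids.index(current_id)
--         return ids[idx + 1] if idx + 1 < len(ids) else None
--     except ValueError: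
--         return ids[0]
-- ===== SOURCE B (Python) =====
-- _NOT_FOUND = object()
--
-- def _next_candidate_id(tab_filtered: list, current_id: int):
--     """Single reverse pass: carry (result, previous element); the leftmost
--     occurrence of current_id overwrites last, so first-occurrence semantics
--     hold without any .index/membership search or materialised id list."""
--     res = _NOT_FOUND
--     prev = None
--     for c in reversed(tab_filtered):
--         x = c["email_id"]
--         if x == current_id:
--             res = prev
--         prev = x
--     if res is _NOT_FOUND:
--         return prev
--     return res
-- ===== Notes on version B (the rewrite author's own statement) =====
-- stated objective: alternative
-- what changed: Replaces the extract-ids / list.index / offset-arithmetic / try-except strategy with one backward pass over the rows carrying a (result, previous-element) accumulator: each match overwrites the result with the previously seen (i.e. following) id, so the leftmost occurrence wins, and the final previous-element doubles as the not-found fallback (first id, or None when empty).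
import Mathlib
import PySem

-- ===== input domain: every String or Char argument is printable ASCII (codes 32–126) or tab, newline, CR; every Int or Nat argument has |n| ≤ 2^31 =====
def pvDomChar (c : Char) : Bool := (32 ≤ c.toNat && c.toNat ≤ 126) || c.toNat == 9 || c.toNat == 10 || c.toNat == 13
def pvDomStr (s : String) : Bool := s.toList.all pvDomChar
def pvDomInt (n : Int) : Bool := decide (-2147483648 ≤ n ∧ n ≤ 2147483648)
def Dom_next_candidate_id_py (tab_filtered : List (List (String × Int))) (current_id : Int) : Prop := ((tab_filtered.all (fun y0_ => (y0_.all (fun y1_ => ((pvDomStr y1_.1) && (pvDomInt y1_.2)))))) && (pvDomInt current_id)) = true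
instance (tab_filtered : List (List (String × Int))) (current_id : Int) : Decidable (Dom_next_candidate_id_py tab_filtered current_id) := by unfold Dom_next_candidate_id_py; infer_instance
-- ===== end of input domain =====

-- B replaces the ids-list + .index + offset lookup with a single backward pass carrying a (result, previous-id) accumulator; same return value everywhere A returns.
-- ===== PORT A =====
-- c["email_id"] (Pre_ guarantees the key is present, so the .getD default is never reached)
def pvGetId (c : List (String × Int)) : Int := ((c.find? (fun p => p.1 == "email_id")).map (fun p => p.2)).getD 0

def next_candidate_id_py (tab_filtered : List (List (String × Int))) (current_id : Int) : Option Int :=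
  if tab_filtered = [] then none
  else
    let ids := tab_filtered.map pvGetId
    match PySem.List.index? ids current_id with
    | some idx => if idx + 1 < ids.length then PySem.List.pyGet? ids ((idx + 1 : Nat) : Int) else none
    | none => PySem.List.pyGet? ids 0

-- ===== PORT B =====
-- state = (res, prev): res = none models the _NOT_FOUND sentinel, some r the stored result; prev the previously seen id
def next_candidate_id_py_alt (tab_filtered : List (List (String × Int))) (current_id : Int) : Option Int :=
  let st := tab_filtered.reverse.foldl
    (fun (st : Option (Option Int) × Option Int) c =>
      let x := pvGetId c
      (if x == current_id then some st.2 else st.1, some x))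
    (none, none)
  match st.1 with
  | some r => r
  | none => st.2

-- ===== PRECONDITION & SPEC =====
-- Pre_ excludes exactly the inputs where Python A raises KeyError: some row lacks the "email_id" key.
def Pre_next_candidate_id_py (tab_filtered : List (List (String × Int))) (current_id : Int) : Prop :=
  ∀ c ∈ tab_filtered, ∃ p ∈ c, p.1 = "email_id"
instance (tab_filtered : List (List (String × Int))) (current_id : Int) : Decidable (Pre_next_candidate_id_py tab_filtered current_id) := by unfold Pre_next_candidate_id_py; infer_instance
def pvWitness_next_candidate_id_py : (List (List (String × Int))) × Int := ([[("email_id", 3)], [("email_id", 5)]], 3)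
def Spec_next_candidate_id_py (tab_filtered : List (List (String × Int))) (current_id : Int) (out : Option Int) : Prop := out = next_candidate_id_py_alt tab_filtered current_id
instance (tab_filtered : List (List (String × Int))) (current_id : Int) (out : Option Int) : Decidable (Spec_next_candidate_id_py tab_filtered current_id out) := by unfold Spec_next_candidate_id_py; infer_instance

-- ===== CLAIM (what is proved, stated in full; the proofs are below) =====
def Claim_equal_next_candidate_id_py : Prop := ∀ (tab_filtered : List (List (String × Int))) (current_id : Int), Dom_next_candidate_id_py tab_filtered current_id → Pre_next_candidate_id_py tab_filtered current_id → Spec_next_candidate_id_py tab_filtered current_id (next_candidate_id_py tab_filtered current_id)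

-- ===== LEMMAS AND PROOFS =====

-- A's core as a function of the ids list
def pvACore (ids : List Int) (cid : Int) : Option Int :=
  match PySem.List.index? ids cid with
  | some idx => if idx + 1 < ids.length then PySem.List.pyGet? ids ((idx + 1 : Nat) : Int) else none
  | none => PySem.List.pyGet? ids 0

-- B's fold step and scan over the ids list
def pvStep (cid : Int) (st : Option (Option Int) × Option Int) (x : Int) : Option (Option Int) × Option Int :=
  (if x == cid then some st.2 else st.1, some x)

def pvScan (ids : List Int) (cid : Int) : Option (Option Int) × Option Int :=
  ids.foldr (fun x st => pvStep cid st x) (none, none)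

def pvBCore (ids : List Int) (cid : Int) : Option Int :=
  match (pvScan ids cid).1 with
  | some r => r
  | none => (pvScan ids cid).2

theorem pvScan_snd (ids : List Int) (cid : Int) : (pvScan ids cid).2 = ids.head? := by
  cases ids with
  | nil => rfl
  | cons x xs => simp [pvScan, pvStep]

theorem pvScan_fst (ids : List Int) (cid : Int) :
    (pvScan ids cid).1 = (PySem.List.index? ids cid).map (fun k => ids[k + 1]?) := by
  induction ids with
  | nil => simp [pvScan, PySem.List.index?]
  | cons x xs ih =>
    by_cases hx : x = cid
    · subst hx
      rw [PySem.List.index?_cons_self]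
      have : (pvScan (x :: xs) x).1 = some (pvScan xs x).2 := by
        simp [pvScan, pvStep]
      rw [this, pvScan_snd]
      simp [List.head?_eq_getElem?]
    · rw [PySem.List.index?_cons_of_ne xs hx]
      have : (pvScan (x :: xs) cid).1 = (pvScan xs cid).1 := by
        simp [pvScan, pvStep, hx]
      rw [this, ih, Option.map_map]
      cases PySem.List.index? xs cid <;> simp

theorem pvCore_eq (ids : List Int) (cid : Int) : pvACore ids cid = pvBCore ids cid := by
  rw [pvACore, pvBCore, pvScan_fst, pvScan_snd]
  cases h : PySem.List.index? ids cid with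
  | none =>
    rw [show (0 : Int) = ((0 : Nat) : Int) from rfl, PySem.List.pyGet?_natCast]
    simp [List.head?_eq_getElem?]
  | some k =>
    simp only [Option.map_some]
    rw [PySem.List.pyGet?_natCast]
    by_cases hlt : k + 1 < ids.length
    · simp [hlt]
    · simp [hlt]

theorem pvA_eq_core (tab : List (List (String × Int))) (cid : Int) :
    next_candidate_id_py tab cid = pvACore (tab.map pvGetId) cid := by
  cases tab with
  | nil => simp [next_candidate_id_py, pvACore, PySem.List.index?, PySem.List.pyGet?]
  | cons c cs => rfl

theorem pvB_eq_core (tab : List (List (String × Int))) (cid : Int) :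
    next_candidate_id_py_alt tab cid = pvBCore (tab.map pvGetId) cid := by
  unfold next_candidate_id_py_alt pvBCore pvScan
  rw [List.foldl_reverse, List.foldr_map]
  rfl

-- ===== VERDICT (by name: the statement is the Claim_ definition above) =====
theorem next_candidate_id_py_spec : Claim_equal_next_candidate_id_py := by
  intro tab cid _ _
  unfold Spec_next_candidate_id_py
  rw [pvA_eq_core, pvB_eq_core, pvCore_eq]
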